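-- pv_equiv track=rewrite | github.com/cchanging/ai-hackthon | wangzhenchen/artifacts/FuzzAsterinas/tools/build_scml_manifest.py | merge_bucket
-- ===== SOURCE A (Python) =====
-- from collections import defaultdict
-- from typing import Any
--
-- def unique_preserve(values: list[str]) -> list[str]:
--     seen: set[str] = set()
--     output: list[str] = []
--     for value in values:
--         if value in seen:
--             continue
--         seen.add(value)
--         output.append(value)
--     return output
--
-- def merge_bucket(sections: list[dict[str, Any]], bucket_name: str) -> dict[str, list[str]]:
--     merged: dict[str, list[str]] = defaultdict(list)
--     for section in sections:
--         for field, values in section.get(bucket_name, {}).items():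
--             merged[field].extend(values)
--     return {
--         field: unique_preserve(values)
--         for field, values in sorted(merged.items())
--     }
-- ===== SOURCE B (Python) =====
-- from typing import Any
--
-- def merge_bucket(sections: list[dict[str, Any]], bucket_name: str) -> dict[str, list[str]]:
--     # Field-major strategy: determine the sorted field list first, then for each
--     # field rescan every section's bucket, appending unseen values (list membership
--     # as the dedup test).  No merged dict of lists and no seen-set are ever built.
--     buckets = [section.get(bucket_name, {}) for section in sections]
--     fields = sorted({field for bucket in buckets for field in bucket})
--     result: dict[str, list[str]] = {}
--     for field in fields:
--         vals: list[str] = []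
--         for bucket in buckets:
--             for v in bucket.get(field, ()):
--                 if v not in vals:
--                     vals.append(v)
--         result[field] = vals
--     return result
-- ===== Notes on version B (the rewrite author's own statement) =====
-- stated objective: alternative
-- what changed: Replaces A's section-major pass that accumulates a merged dict of value lists and then dedups each list with a seen-set (unique_preserve) by a field-major algorithm: compute the sorted field list first, then for each field rescan every section's bucket, appending values with a plain list-membership dedup; no merged dict and no seen-set exist.
import Mathlib
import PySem

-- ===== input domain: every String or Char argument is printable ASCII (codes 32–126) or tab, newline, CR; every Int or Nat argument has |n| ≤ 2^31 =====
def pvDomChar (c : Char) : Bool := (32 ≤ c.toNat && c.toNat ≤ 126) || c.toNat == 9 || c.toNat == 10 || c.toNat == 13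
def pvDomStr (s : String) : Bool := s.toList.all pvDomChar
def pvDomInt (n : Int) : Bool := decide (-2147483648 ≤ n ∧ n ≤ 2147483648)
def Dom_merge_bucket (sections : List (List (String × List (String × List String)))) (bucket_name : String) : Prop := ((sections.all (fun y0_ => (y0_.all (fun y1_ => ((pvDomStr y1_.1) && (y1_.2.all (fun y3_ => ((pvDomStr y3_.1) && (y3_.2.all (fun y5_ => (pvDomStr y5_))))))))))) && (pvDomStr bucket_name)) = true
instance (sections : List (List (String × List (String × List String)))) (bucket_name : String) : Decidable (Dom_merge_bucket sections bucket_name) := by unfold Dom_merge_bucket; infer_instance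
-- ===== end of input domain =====

-- B replaces A's section-major accumulation (merged dict of lists, then a seen-set dedup
-- pass) by a field-major algorithm: sorted field list first, then one rescan of the
-- sections per field with a list-membership dedup (objective: alternative, not faster).
-- Python dict keys are unique, so sorted(d.items()) never compares second components;
-- it is ported as a stable sort keyed on the first component.

-- ===== PORT A =====
def unique_preserve (values : List String) : List String :=
  (values.foldl
    (fun (st : PySem.Set String × List String) value =>
      if PySem.Set.contains st.1 value then st
      else (PySem.Set.add st.1 value, st.2 ++ [value]))
    (PySem.Set.empty, [])).2

def merge_bucket (sections : List (List (String × List (String × List String)))) (bucket_name : String) : List (String × List String) :=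
  let merged : PySem.Dict String (List String) :=
    sections.foldl
      (fun merged sec =>
        ((PySem.Dict.mk sec).getD bucket_name []).foldl
          (fun merged fv => merged.modify fv.1 [] (· ++ fv.2))
          merged)
      PySem.Dict.empty
  (PySem.List.sorted merged.items (fun p => p.1) false).map
    (fun fv => (fv.1, unique_preserve fv.2))

-- ===== PORT B =====
-- `result[field] = vals` over the distinct sorted fields is Dict.insert from empty;
-- iterating a dict (`for field in bucket`) yields its keys, i.e. the first components.
def merge_bucket_alt (sections : List (List (String × List (String × List String)))) (bucket_name : String) : List (String × List String) :=
  let buckets : List (List (String × List String)) :=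
    sections.map (fun sec => (PySem.Dict.mk sec).getD bucket_name [])
  let fields : List String :=
    PySem.List.sorted (PySem.Set.ofList (buckets.flatMap (fun bucket => bucket.map Prod.fst))) (fun f => f) false
  (fields.foldl
    (fun result field =>
      result.insert field
        (buckets.foldl
          (fun vals bucket =>
            ((PySem.Dict.mk bucket).getD field []).foldl
              (fun vals v => if vals.contains v then vals else vals ++ [v]) vals)
          []))
    PySem.Dict.empty).items

-- ===== PRECONDITION & SPEC =====
-- Pre_ excludes only association lists whose inner bucket dicts carry DUPLICATE field
-- keys: no Python dict can hold duplicate keys, so such inputs represent no Python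
-- value and first-match-vs-all-matches there is an artefact of the assoc-list encoding.
def Pre_merge_bucket (sections : List (List (String × List (String × List String)))) (bucket_name : String) : Prop :=
  ∀ sec ∈ sections, ∀ p ∈ sec, (p.2.map Prod.fst).Nodup
instance (sections : List (List (String × List (String × List String)))) (bucket_name : String) : Decidable (Pre_merge_bucket sections bucket_name) := by unfold Pre_merge_bucket; infer_instance

def pvWitness_merge_bucket : (List (List (String × List (String × List String)))) × String :=
  ([[("b", [("f", ["x", "x", "y"]), ("e", [])])], [("b", [("f", ["z", "x"])])]], "b")

def Spec_merge_bucket (sections : List (List (String × List (String × List String)))) (bucket_name : String) (out : List (String × List String)) : Prop := out = merge_bucket_alt sections bucket_name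
instance (sections : List (List (String × List (String × List String)))) (bucket_name : String) (out : List (String × List String)) : Decidable (Spec_merge_bucket sections bucket_name out) := by unfold Spec_merge_bucket; infer_instance

-- ===== CLAIM (what is proved, stated in full; the proofs are below) =====
def Claim_equal_merge_bucket : Prop := ∀ (sections : List (List (String × List (String × List String)))) (bucket_name : String), Dom_merge_bucket sections bucket_name → Pre_merge_bucket sections bucket_name → Spec_merge_bucket sections bucket_name (merge_bucket sections bucket_name)

-- ===== LEMMAS AND PROOFS =====

-- a nested loop over a list of lists is one loop over the concatenation
theorem pv_foldl_flat {α β γ : Type} (step : γ → β → γ) (h : α → List β) :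
    ∀ (l : List α) (init : γ),
      l.foldl (fun acc a => (h a).foldl step acc) init = (l.flatMap h).foldl step init := by
  intro l
  induction l with
  | nil => intro init; simp
  | cons x xs ih => intro init; simp [List.foldl_append, ih]

-- A's merged-dict value at a field is the concatenation of that field's value lists
theorem pv_getD_modify (f : String) :
    ∀ (l : List (String × List String)) (d : PySem.Dict String (List String)),
      (l.foldl (fun m fv => m.modify fv.1 [] (· ++ fv.2)) d).getD f []
        = d.getD f [] ++ (l.filter (fun p => p.1 == f)).flatMap (·.2) := by
  intro l
  induction l with
  | nil => intro d; simp
  | cons p l ih =>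
      intro d
      by_cases h : p.1 = f
      · simp [ih, PySem.Dict.getD_modify, h]
      · simp [ih, PySem.Dict.getD_modify, h, Ne.symm h]

-- unique_preserve is Python's ordered dedup, i.e. set-of-list in first-occurrence order
theorem pv_unique_preserve_eq (vs : List String) :
    unique_preserve vs = PySem.Set.ofList vs := by
  have aux : ∀ (vs : List String) (s : PySem.Set String),
      vs.foldl
          (fun (st : PySem.Set String × List String) value =>
            if PySem.Set.contains st.1 value then st
            else (PySem.Set.add st.1 value, st.2 ++ [value]))
          (s, s)
        = (vs.foldl PySem.Set.add s, vs.foldl PySem.Set.add s) := by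
    intro vs
    induction vs with
    | nil => intro s; simp
    | cons v vs ih =>
        intro s
        by_cases hv : v ∈ s
        · have h1 : PySem.Set.contains s v = true := by simp [hv]
          simp only [List.foldl_cons, PySem.Set.add_of_mem hv, h1, reduceIte]
          exact ih s
        · have h1 : PySem.Set.contains s v = false := by simp [hv]
          simp only [List.foldl_cons, PySem.Set.add_of_not_mem hv, h1,
            Bool.false_eq_true, reduceIte]
          exact ih (s ++ [v])
  have : unique_preserve vs = vs.foldl PySem.Set.add [] := by
    simp [unique_preserve, PySem.Set.empty] at *
    rw [show (([] : List String), ([] : List String)) = ((([] : PySem.Set String), ([] : List String)) : PySem.Set String × List String) from rfl]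
    rw [aux vs []]
  rw [this, PySem.Set.ofList_eq_foldl]

-- B's inner membership-test append IS Set.add, so the gathering fold is Set.ofList
theorem pv_gather_eq (l : List String) :
    l.foldl (fun vals v => if vals.contains v then vals else vals ++ [v]) ([] : List String)
      = PySem.Set.ofList l := by
  rw [PySem.Set.ofList_eq_foldl]
  rfl

-- lookup in a duplicate-free dict literal = concatenation over the (≤ 1) matching entries
theorem pv_getD_mk (f : String) :
    ∀ (b : List (String × List String)), (b.map Prod.fst).Nodup →
      (PySem.Dict.mk b).getD f [] = (b.filter (fun p => p.1 == f)).flatMap (·.2) := by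
  intro b
  induction b with
  | nil => intro _; simp [PySem.Dict.getD, PySem.Dict.get?]
  | cons p b ih =>
      intro hnd
      simp only [List.map_cons, List.nodup_cons] at hnd
      by_cases h : p.1 = f
      · have hb : b.filter (fun q => q.1 == f) = [] := by
          rw [List.filter_eq_nil_iff]
          intro q hq
          simp only [beq_iff_eq]
          intro hqf
          exact hnd.1 (by rw [h, ← hqf]; exact List.mem_map_of_mem hq)
        simp [PySem.Dict.getD, PySem.Dict.get?, h, hb]
      · simp only [List.filter_cons, beq_iff_eq, h, if_false]
        rw [← ih hnd.2]
        simp [PySem.Dict.getD, PySem.Dict.get?, h]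

-- filtering the concatenation = concatenating the filtered pieces (then flattening values)
theorem pv_flat_filter {α β : Type} (P : α → Bool) (h : α → List β) :
    ∀ (bs : List (List α)),
      bs.flatMap (fun b => (b.filter P).flatMap h) = (bs.flatten.filter P).flatMap h := by
  intro bs
  induction bs with
  | nil => simp
  | cons b bs ih => simp [List.filter_append, ih]

-- stable sort by first component of key-tagged values = sort the keys, then tag
theorem pv_insertBy_map {α β : Type} (g : α → β) (bef : β → β → Bool) (bef' : α → α → Bool)
    (hb : ∀ a b, bef (g a) (g b) = bef' a b) (x : α) :
    ∀ l : List α,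
      PySem.List.insertBy bef (g x) (l.map g) = (PySem.List.insertBy bef' x l).map g := by
  intro l
  induction l with
  | nil => simp [PySem.List.insertBy]
  | cons y ys ih =>
      simp only [List.map_cons, PySem.List.insertBy, hb]
      by_cases hxy : bef' x y = true <;>
        simp [hxy] <;> simpa [PySem.List.insertBy] using ih

theorem pv_sorted_map {V : Type} (g : String → String × V) (hg : ∀ s, (g s).1 = s)
    (l : List String) :
    PySem.List.sorted (l.map g) (fun p => p.1) false
      = (PySem.List.sorted l (fun s => s) false).map g := by
  rw [PySem.List.sorted_eq_foldl_insertBy, PySem.List.sorted_eq_foldl_insertBy]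
  have aux : ∀ (l : List String) (acc : List String),
      (l.map g).foldl
          (fun acc x => PySem.List.insertBy (fun a b => decide (a.1 < b.1)) x acc) (acc.map g)
        = (l.foldl (fun acc x => PySem.List.insertBy (fun a b => decide (a < b)) x acc) acc).map g := by
    intro l
    induction l with
    | nil => intro acc; simp
    | cons x xs ih =>
        intro acc
        have := pv_insertBy_map g (fun a b => decide (a.1 < b.1)) (fun a b => decide (a < b))
          (by intro a b; simp [hg]) x acc
        simp only [List.map_cons, List.foldl_cons, this]
        exact ih _
  simpa using aux l []

-- ===== VERDICT (by name: the statement is the Claim_ definition above) =====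
theorem merge_bucket_spec : Claim_equal_merge_bucket := by
  intro sections bucket_name _ hpre
  unfold Spec_merge_bucket
  simp only [merge_bucket, merge_bucket_alt]
  -- shared names for both sides
  set g : List (String × List (String × List String)) → List (String × List String) :=
    fun sec => (PySem.Dict.mk sec).getD bucket_name [] with hgdef
  set L : List (String × List String) := sections.flatMap g with hLdef
  set buckets : List (List (String × List String)) := sections.map g with hBdef
  set gather : String → List String := fun field =>
    buckets.foldl
      (fun vals bucket =>
        ((PySem.Dict.mk bucket).getD field []).foldl
          (fun vals v => if vals.contains v then vals else vals ++ [v]) vals)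
      [] with hGdef
  set merged : PySem.Dict String (List String) :=
    L.foldl (fun m fv => m.modify fv.1 [] (· ++ fv.2)) PySem.Dict.empty with hMdef
  -- A's nested accumulation is the flat fold over L
  have hA1 : sections.foldl
      (fun merged sec => (g sec).foldl (fun m fv => m.modify fv.1 [] (· ++ fv.2)) merged)
      PySem.Dict.empty = merged := by
    rw [hMdef, hLdef]; exact pv_foldl_flat _ g sections _
  -- merged's keys
  have hkeys : merged.keys = PySem.Set.ofList (L.map Prod.fst) := by
    rw [hMdef,
      PySem.Dict.keys_foldl_modify_key L Prod.fst [] (fun _ fv v => v ++ fv.2) PySem.Dict.empty,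
      PySem.Dict.keys_empty, PySem.Set.update_nil_left]
  have hnod : merged.keys.Nodup := by
    rw [hMdef]
    exact PySem.Dict.nodup_keys_foldl_modify_key L Prod.fst [] (fun _ fv v => v ++ fv.2)
      PySem.Dict.empty (by rw [PySem.Dict.keys_empty]; exact List.nodup_nil)
  -- B's field universe is the same key list
  have hBkeys : buckets.flatMap (fun bucket => bucket.map Prod.fst) = L.map Prod.fst := by
    rw [hBdef, hLdef, List.flatMap_map, List.map_flatMap]
  -- every bucket is duplicate-key-free (Pre_)
  have hBnod : ∀ b ∈ buckets, (b.map Prod.fst).Nodup := by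
    intro b hb
    rw [hBdef] at hb
    obtain ⟨sec, hsec, rfl⟩ := List.mem_map.1 hb
    rw [hgdef]
    simp only [PySem.Dict.getD_eq_get?_getD]
    cases hget : (PySem.Dict.mk sec).get? bucket_name with
    | none => simp
    | some v =>
        simp only [Option.getD_some]
        exact hpre sec hsec (bucket_name, v) (PySem.Dict.mem_items_of_get?_eq_some _ hget)
  have hfnod : (PySem.List.sorted merged.keys (fun f => f) false).Nodup :=
    ((PySem.List.sorted_perm merged.keys (fun f => f) false).symm).nodup
      (hkeys ▸ PySem.Set.nodup_ofList (L.map Prod.fst))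
  -- B's result dict: fresh distinct inserts append
  have hB1 : ((PySem.List.sorted merged.keys (fun f => f) false).foldl
      (fun result field => result.insert field (gather field)) PySem.Dict.empty).items
      = (PySem.List.sorted merged.keys (fun f => f) false).map (fun f => (f, gather f)) := by
    rw [PySem.Dict.items_foldl_insert_fresh _ (fun f => f) gather PySem.Dict.empty
      (fun a _ => PySem.Dict.contains_empty a) (by simpa using hfnod)]
    rfl
  rw [hA1, hBkeys, ← hkeys, hB1,
    PySem.Dict.items_eq_map_keys merged hnod [],
    pv_sorted_map (fun k => (k, merged.getD k [])) (fun s => rfl), List.map_map]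
  refine List.map_congr_left ?_
  intro k _
  simp only [Function.comp]
  refine Prod.ext rfl ?_
  show unique_preserve (merged.getD k []) = gather k
  rw [hMdef] at *
  rw [pv_getD_modify k L PySem.Dict.empty, PySem.Dict.getD_empty, List.nil_append,
    pv_unique_preserve_eq, hGdef]
  show PySem.Set.ofList _ = buckets.foldl _ []
  rw [pv_foldl_flat _ (fun bucket => (PySem.Dict.mk bucket).getD k []) buckets [],
    pv_gather_eq]
  congr 1
  have hcong : buckets.flatMap (fun bucket => (PySem.Dict.mk bucket).getD k [])
      = buckets.flatMap (fun b => (b.filter (fun p => p.1 == k)).flatMap (·.2)) := by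
    rw [List.flatMap_def, List.flatMap_def]
    exact congrArg List.flatten (List.map_congr_left (fun b hb => pv_getD_mk k b (hBnod b hb)))
  rw [hcong, pv_flat_filter, show buckets.flatten = L by rw [hBdef, hLdef, ← List.flatMap_def]]
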